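-- pv_equiv track=rewrite | github.com/kundan7kumar/Algorithmic-Challenge | Data_Structure/Array/sum_submatrix.py | sum_submatrix
-- ===== SOURCE A (Python) =====
-- def sum_submatrix(arr):
--     sum = 0
--     n=len(arr)
--     for i in range(n):
--         for j in range(n):
--             left= (i+1)*(j+1)
--             right = (n-i)*(n-j)
--             sum+=(left*right*arr[i][j])
--     return sum
-- ===== SOURCE B (Python) =====
-- def _interval_total(xs):
--     # Sum, over every contiguous interval of xs, of that interval's sum,
--     # computed with running prefix sums: p = P[b+1], q = sum_{a<=b} P[a],
--     # and the intervals ending at b contribute (b+1)*P[b+1] - q.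
--     total = 0
--     p = 0
--     q = 0
--     for b, x in enumerate(xs):
--         q += p
--         p += x
--         total += (b + 1) * p - q
--     return total
--
-- def sum_submatrix(arr):
--     # The requested value is the total of the sums of all n*n submatrices,
--     # which factorizes: reduce each row over all column intervals, then
--     # reduce that vector over all row intervals.  No per-cell weights.
--     n = len(arr)
--     u = [_interval_total(row[:n]) for row in arr]
--     return _interval_total(u)
-- ===== Notes on version B (the rewrite author's own statement) =====
-- stated objective: alternative
-- what changed: A sums per-cell weights (i+1)(j+1)(n-i)(n-j)*arr[i][j] in one fused nested loop; B never forms a weight: it computes, per row, the total of the sums of all contiguous intervals via running prefix-of-prefix sums (p = prefix, q = sum of earlier prefixes, contribution (b+1)*p - q), materializes that vector, and applies the same interval-total reduction to it.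
import Mathlib
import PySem

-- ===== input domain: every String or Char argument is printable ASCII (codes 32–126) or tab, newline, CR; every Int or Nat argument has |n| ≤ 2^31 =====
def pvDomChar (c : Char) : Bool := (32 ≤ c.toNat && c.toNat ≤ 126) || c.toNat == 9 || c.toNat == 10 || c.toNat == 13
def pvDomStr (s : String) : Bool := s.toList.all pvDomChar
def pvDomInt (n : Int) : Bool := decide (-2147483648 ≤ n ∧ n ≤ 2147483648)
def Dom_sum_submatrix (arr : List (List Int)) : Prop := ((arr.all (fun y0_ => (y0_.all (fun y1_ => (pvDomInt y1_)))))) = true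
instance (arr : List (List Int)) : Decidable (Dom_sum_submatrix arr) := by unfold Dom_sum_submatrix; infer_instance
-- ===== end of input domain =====

-- B drops A's explicit per-cell weights entirely: it computes the sum of the sums of all
-- contiguous intervals of each row by running prefix-of-prefix sums, then reduces the
-- resulting vector the same way (alternative algorithm, same asymptotic cost).

-- ===== PORT A =====
-- literal port of A's fused nested loop with a single running accumulator
def sum_submatrix (arr : List (List Int)) : Int :=
  let n : Int := (arr.length : Int)
  (PySem.List.pyRange 0 n 1).foldl (fun s i =>
    (PySem.List.pyRange 0 n 1).foldl (fun s j =>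
      let left := (i + 1) * (j + 1)
      let right := (n - i) * (n - j)
      s + left * right * PySem.List.pyGetD (PySem.List.pyGetD arr i []) j 0) s) 0

-- ===== PORT B =====
-- the loop body of Source B's _interval_total: update q, p, then the running total
def pvIStep (s : Int × Int × Int) (bx : Int × Int) : Int × Int × Int :=
  let q := s.2.2 + s.2.1
  let p := s.2.1 + bx.2
  (s.1 + (bx.1 + 1) * p - q, p, q)

-- Source B's _interval_total: fold the step over enumerate(xs) from (total, p, q) = (0, 0, 0)
def pvIntervalTotal (xs : List Int) : Int :=
  ((PySem.List.enumerate xs 0).foldl pvIStep (0, 0, 0)).1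

-- literal port of B: u = [_interval_total(row[:n]) for row in arr]; _interval_total(u)
def sum_submatrix_alt (arr : List (List Int)) : Int :=
  let n : Int := (arr.length : Int)
  let u : List Int := arr.map (fun row => pvIntervalTotal (PySem.List.slice row none (some n)))
  pvIntervalTotal u

-- ===== PRECONDITION & SPEC =====
-- Pre_ excludes only ragged inputs on which Python A raises IndexError (a row shorter than the matrix)
def Pre_sum_submatrix (arr : List (List Int)) : Prop :=
  ∀ row ∈ arr, arr.length ≤ row.length
instance (arr : List (List Int)) : Decidable (Pre_sum_submatrix arr) := by
  unfold Pre_sum_submatrix; infer_instance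

def pvWitness_sum_submatrix : List (List Int) := [[1, 2], [3, 4]]

def Spec_sum_submatrix (arr : List (List Int)) (out : Int) : Prop := out = sum_submatrix_alt arr
instance (arr : List (List Int)) (out : Int) : Decidable (Spec_sum_submatrix arr out) := by
  unfold Spec_sum_submatrix; infer_instance

-- ===== CLAIM (what is proved, stated in full; the proofs are below) =====
def Claim_equal_sum_submatrix : Prop := ∀ (arr : List (List Int)), Dom_sum_submatrix arr → Pre_sum_submatrix arr → Spec_sum_submatrix arr (sum_submatrix arr)

-- ===== LEMMAS AND PROOFS =====

-- enumerate over a snoc appends the final index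
theorem pv_enumerate_append {α : Type} (xs : List α) (x : α) (s : Int) :
    PySem.List.enumerate (xs ++ [x]) s
      = PySem.List.enumerate xs s ++ [(s + (xs.length : Int), x)] := by
  induction xs generalizing s with
  | nil => simp [PySem.List.enumerate_cons, PySem.List.enumerate_nil]
  | cons y ys ih =>
      simp only [List.cons_append, PySem.List.enumerate_cons, ih (s + 1), List.length_cons]
      push_cast
      ring_nf

-- closed form of the running state of _interval_total
theorem pv_sum_map_sub {α : Type} (xs : List α) (f g : α → Int) :
    (xs.map (fun x => f x - g x)).sum = (xs.map f).sum - (xs.map g).sum := by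
  induction xs with
  | nil => simp
  | cons a t ih => simp [ih]; ring

theorem pv_it_state (xs : List Int) :
    (PySem.List.enumerate xs 0).foldl pvIStep (0, 0, 0)
      = ( ((PySem.List.enumerate xs 0).map
            (fun p => (p.1 + 1) * ((xs.length : Int) - p.1) * p.2)).sum,
          xs.sum,
          ((PySem.List.enumerate xs 0).map
            (fun p => ((xs.length : Int) - 1 - p.1) * p.2)).sum ) := by
  induction xs using List.reverseRecOn with
  | nil => simp [PySem.List.enumerate_nil]
  | append_singleton ys y ih =>
      rw [pv_enumerate_append, List.foldl_append, ih]
      have h2 : ((PySem.List.enumerate ys 0).map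
            (fun p => (ys.length : Int) * p.2)).sum
          = (ys.length : Int) * ys.sum := by
        rw [List.sum_map_mul_left, PySem.List.map_snd_enumerate]
      simp only [List.foldl_cons, List.foldl_nil, pvIStep,
        List.map_append, List.sum_append, List.map_cons, List.map_nil, List.sum_cons,
        List.sum_nil, List.length_append, List.length_cons, List.length_nil,
        zero_add, add_zero]
      push_cast
      simp only [Prod.mk.injEq]
      refine ⟨?_, ?_, ?_⟩
      · -- total component
        have hA : ((PySem.List.enumerate ys 0).map
              (fun p => (p.1 + 1) * ((ys.length : Int) + 1 - p.1) * p.2)).sum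
            = ((PySem.List.enumerate ys 0).map
              (fun p => ((p.1 + 1) * ((ys.length : Int) - p.1) * p.2
                  + (ys.length : Int) * p.2)
                - ((ys.length : Int) - 1 - p.1) * p.2)).sum := by
          refine congrArg List.sum (List.map_congr_left ?_)
          intro p _
          ring
        rw [hA, pv_sum_map_sub, PySem.List.sum_map_add_int, h2]
        ring
      · -- prefix-sum component
        simp
      · -- q component
        have hA : ((PySem.List.enumerate ys 0).map
              (fun p => ((ys.length : Int) + 1 - 1 - p.1) * p.2)).sum
            = ((PySem.List.enumerate ys 0).map
              (fun p => ((ys.length : Int) - 1 - p.1) * p.2 + p.2)).sum := by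
          refine congrArg List.sum (List.map_congr_left ?_)
          intro p _
          ring
        rw [hA, PySem.List.sum_map_add_int, PySem.List.map_snd_enumerate]
        ring

theorem pv_intervalTotal_enum (xs : List Int) :
    pvIntervalTotal xs
      = ((PySem.List.enumerate xs 0).map
          (fun p => (p.1 + 1) * ((xs.length : Int) - p.1) * p.2)).sum := by
  unfold pvIntervalTotal
  rw [pv_it_state]

-- an enumerate-sum is a range-sum
theorem pv_enum_sum (g : Int → Int → Int) (xs : List Int) (s : Int) :
    ((PySem.List.enumerate xs s).map (fun p => g p.1 p.2)).sum
      = ((List.range xs.length).map (fun (k : Nat) => g (s + (k : Int)) (xs.getD k 0))).sum := by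
  induction xs generalizing s with
  | nil => simp [PySem.List.enumerate_nil]
  | cons x xs ih =>
      rw [PySem.List.enumerate_cons, List.map_cons, List.sum_cons, ih (s + 1),
        List.length_cons, List.range_succ_eq_map, List.map_cons, List.map_map,
        List.sum_cons]
      congr 1
      · simp
      · refine congrArg List.sum (List.map_congr_left ?_)
        intro k _
        simp only [Function.comp_apply, List.getD_cons_succ]
        congr 1
        push_cast
        ring

theorem pv_intervalTotal_range (xs : List Int) :
    pvIntervalTotal xs
      = ((List.range xs.length).map
          (fun (k : Nat) => ((k : Int) + 1) * ((xs.length : Int) - (k : Int)) * xs.getD k 0)).sum := by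
  rw [pv_intervalTotal_enum,
    pv_enum_sum (fun i v => (i + 1) * ((xs.length : Int) - i) * v) xs 0]
  simp

-- A as a double range-sum
theorem pv_A_sum (arr : List (List Int)) :
    sum_submatrix arr
      = ((List.range arr.length).map (fun (i : Nat) =>
          ((List.range arr.length).map (fun (j : Nat) =>
            ((i : Int) + 1) * ((j : Int) + 1)
              * (((arr.length : Int) - (i : Int)) * ((arr.length : Int) - (j : Int)))
              * ((arr.getD i []).getD j 0))).sum)).sum := by
  unfold sum_submatrix
  simp only [PySem.List.foldl_add, zero_add, PySem.List.pyRange_zero_nat, List.map_map]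
  refine congrArg List.sum (List.map_congr_left ?_)
  intro i _
  simp only [Function.comp_apply]
  refine congrArg List.sum (List.map_congr_left ?_)
  intro j _
  simp [PySem.List.pyGetD_natCast]

-- B as a double range-sum, on non-ragged input
theorem pv_getD_map_pv (arr : List (List Int)) (f : List Int → Int) (k : Nat)
    (hk : k < arr.length) : (arr.map f).getD k 0 = f (arr.getD k []) := by
  rw [List.getD_eq_getElem (arr.map f) 0 (by simpa using hk), List.getElem_map,
    List.getD_eq_getElem arr [] hk]

theorem pv_B_sum (arr : List (List Int)) (hp : Pre_sum_submatrix arr) :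
    sum_submatrix_alt arr
      = ((List.range arr.length).map (fun (i : Nat) =>
          ((i : Int) + 1) * ((arr.length : Int) - (i : Int))
            * ((List.range arr.length).map (fun (j : Nat) =>
                ((j : Int) + 1) * ((arr.length : Int) - (j : Int))
                  * ((arr.getD i []).getD j 0))).sum)).sum := by
  unfold sum_submatrix_alt
  simp only
  rw [pv_intervalTotal_range]
  simp only [List.length_map]
  refine congrArg List.sum (List.map_congr_left ?_)
  intro i hi
  have hi' : i < arr.length := List.mem_range.mp hi
  rw [pv_getD_map_pv arr _ i hi']
  have hrow : arr.length ≤ (arr.getD i []).length := by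
    rw [List.getD_eq_getElem arr [] hi']
    exact hp _ (List.getElem_mem hi')
  have hsl : PySem.List.slice (arr.getD i []) none (some ((arr.length : Nat) : Int))
      = (arr.getD i []).take arr.length := PySem.List.slice_to_natCast _ _
  rw [hsl, pv_intervalTotal_range]
  have hlen : ((arr.getD i []).take arr.length).length = arr.length := by
    rw [List.length_take]
    omega
  rw [hlen]
  congr 1
  refine congrArg List.sum (List.map_congr_left ?_)
  intro j hj
  have hj' : j < arr.length := List.mem_range.mp hj
  have h1 : ((arr.getD i []).take arr.length).getD j 0 = (arr.getD i []).getD j 0 := by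
    rw [List.getD_eq_getElem ((arr.getD i []).take arr.length) 0 (by omega : j < ((arr.getD i []).take arr.length).length),
        List.getD_eq_getElem (arr.getD i []) 0 (by omega : j < (arr.getD i []).length)]
    simp [List.getElem_take]
  rw [h1]

theorem sum_submatrix_eq (arr : List (List Int)) (hp : Pre_sum_submatrix arr) :
    sum_submatrix arr = sum_submatrix_alt arr := by
  rw [pv_A_sum, pv_B_sum arr hp]
  refine congrArg List.sum (List.map_congr_left ?_)
  intro i _
  rw [← List.sum_map_mul_left]
  refine congrArg List.sum (List.map_congr_left ?_)
  intro j _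
  ring

-- ===== VERDICT (by name: the statement is the Claim_ definition above) =====
theorem sum_submatrix_spec : Claim_equal_sum_submatrix := by
  intro arr _ hp
  exact sum_submatrix_eq arr hp
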